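-- pv_equiv track=rewrite | github.com/Yash9988/self-learn | leetcode/2461.py | maximumSubarraySum_alt
-- ===== SOURCE A (Python) =====
-- def maximumSubarraySum_alt(nums: list[int], k: int) -> int:
--     res = 0                                                     # Initialise a counter to track the max-sum
--     prev_idx = {}                                               # Initialise a dict to track prev index of a num
--     cur_sum = 0                                                 # Initialise a counter to track window sum
--
--     l = 0                                                       # Initialise window start pointer
--
--     for r in range(len(nums)):                                  # Iterate through the list
--         cur_sum += nums[r]                                      # Increment the counter with element value
--
--         i = prev_idx.get(nums[r], -1)                           # Obtain the previous index of the element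
--
--         while l <= i or r - l + 1 > k:                          # Check if pointer `<=` prev-idx or window `>` desired length
--             cur_sum -= nums[l]                                  # Decrement the counter by element value at window start
--             l += 1                                              # Increment the pointer
--
--         if r - l + 1 == k:                                      # Check if the window is of desired length
--             res = max(res, cur_sum)                             # Update the counter with max-val
--
--         prev_idx[nums[r]] = r                                   # Update the prev-idx of the element
--
--     return res                                                  # Return the result
-- ===== SOURCE B (Python) =====
-- def maximumSubarraySum_alt(nums: list[int], k: int) -> int:
--     res = 0
--     for i in range(len(nums) - k + 1):                  # every window start
--         w = nums[i:i + k]                               # the length-k window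
--         if len(set(w)) == k:                            # all elements distinct
--             res = max(res, sum(w))
--     return res
-- ===== Notes on version B (the rewrite author's own statement) =====
-- stated objective: simpler
-- what changed: Replaced the stateful variable-size sliding window (prev-index dict, running sum, inner while loop moving the left pointer) with a direct scan over all window starts: slice each length-k window, test distinctness with set(), and take the max sum.
import Mathlib
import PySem

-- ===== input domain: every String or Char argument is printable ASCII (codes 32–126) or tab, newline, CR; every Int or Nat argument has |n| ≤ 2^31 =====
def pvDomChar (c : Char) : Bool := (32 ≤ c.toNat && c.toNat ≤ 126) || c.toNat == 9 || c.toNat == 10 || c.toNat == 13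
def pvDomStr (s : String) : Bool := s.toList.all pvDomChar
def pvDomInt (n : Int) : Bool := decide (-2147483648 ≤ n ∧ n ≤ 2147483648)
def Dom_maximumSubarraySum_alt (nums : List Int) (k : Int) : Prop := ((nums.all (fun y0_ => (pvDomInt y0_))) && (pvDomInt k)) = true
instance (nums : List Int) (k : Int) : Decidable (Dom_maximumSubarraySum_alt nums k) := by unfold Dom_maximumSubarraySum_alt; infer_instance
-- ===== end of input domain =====

-- B replaces A's stateful variable-size sliding window (prev-index dict + inner while) by a
-- direct scan over all length-k window starts, testing distinctness per window; simpler, not faster.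


-- ===== PORT A =====
-- the inner `while l <= i or r - l + 1 > k:` loop; fuel-bounded recursion (fuel nums.length+1
-- is enough wherever the Python loop terminates without raising, i.e. on Pre_);
-- `pyGetD nums l 0` is `nums[l]`, exact while l is in range (Python raises only outside Pre_)
def whileA (nums : List Int) (k i r : Int) : Nat → Int × Int → Int × Int
  | 0, st => st
  | fuel + 1, st =>
    if st.1 ≤ i ∨ r - st.1 + 1 > k then
      whileA nums k i r fuel (st.1 + 1, st.2 - PySem.List.pyGetD nums st.1 0)
    else st

-- one iteration of A's `for r in range(len(nums))` loop; state = (res, prev_idx, cur_sum, l)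
def stepA (nums : List Int) (k : Int) (st : Int × PySem.Dict Int Int × Int × Int) (r : Nat) :
    Int × PySem.Dict Int Int × Int × Int :=
  let x := PySem.List.pyGetD nums (r : Int) 0                 -- nums[r]
  let cur := st.2.2.1 + x                                     -- cur_sum += nums[r]
  let i := (st.2.1).getD x (-1)                               -- i = prev_idx.get(nums[r], -1)
  let lc := whileA nums k i (r : Int) (nums.length + 1) (st.2.2.2, cur)
  let res := if (r : Int) - lc.1 + 1 = k then max st.1 lc.2 else st.1
  (res, (st.2.1).insert x (r : Int), lc.2, lc.1)

def maximumSubarraySum_alt (nums : List Int) (k : Int) : Int :=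
  ((List.range nums.length).foldl (stepA nums k) (0, PySem.Dict.empty, 0, 0)).1

-- ===== PORT B =====
def maximumSubarraySum_alt_alt (nums : List Int) (k : Int) : Int :=
  (PySem.List.pyRange 0 ((nums.length : Int) - k + 1) 1).foldl
    (fun res i =>
      let w := PySem.List.slice nums (some i) (some (i + k))  -- w = nums[i:i+k]
      if ((PySem.Set.ofList w).length : Int) = k then         -- len(set(w)) == k
        max res w.sum                                         -- res = max(res, sum(w))
      else res)
    0

-- ===== PRECONDITION & SPEC =====
-- A raises IndexError exactly when nums ≠ [] and k < 0 (the while loop walks l past the end)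
def Pre_maximumSubarraySum_alt (nums : List Int) (k : Int) : Prop := 0 ≤ k ∨ nums = []
instance (nums : List Int) (k : Int) : Decidable (Pre_maximumSubarraySum_alt nums k) := by
  unfold Pre_maximumSubarraySum_alt; infer_instance

def pvWitness_maximumSubarraySum_alt : List Int × Int := ([1, 5, 4, 2, 9, 9, 9], 3)

def Spec_maximumSubarraySum_alt (nums : List Int) (k : Int) (out : Int) : Prop :=
  out = maximumSubarraySum_alt_alt nums k
instance (nums : List Int) (k : Int) (out : Int) : Decidable (Spec_maximumSubarraySum_alt nums k out) := by
  unfold Spec_maximumSubarraySum_alt; infer_instance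

-- ===== CLAIM (what is proved, stated in full; the proofs are below) =====
def Claim_equal_maximumSubarraySum_alt : Prop := ∀ (nums : List Int) (k : Int), Dom_maximumSubarraySum_alt nums k → Pre_maximumSubarraySum_alt nums k → Spec_maximumSubarraySum_alt nums k (maximumSubarraySum_alt nums k)

-- ===== LEMMAS AND PROOFS =====

-- `seg nums s e` = the sublist nums[s:e] (Nat bounds, clamped like drop/take)
def seg (nums : List Int) (s e : Nat) : List Int := (nums.drop s).take (e - s)

-- last index j < r with nums[j] = v, as an Int; -1 if none (A's prev_idx.get default)
def lastLt (nums : List Int) (r : Nat) (v : Int) : Int :=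
  (List.range r).foldl (fun a j => if nums.getD j 0 = v then (j : Int) else a) (-1)

-- minimal start s such that nums[s:r] has pairwise-distinct elements
def dmin (nums : List Int) : Nat → Int
  | 0 => 0
  | r + 1 => max (dmin nums r) (lastLt nums r (nums.getD r 0) + 1)

-- A's left pointer after processing r elements
def lSpec (nums : List Int) (k : Int) (r : Nat) : Int := max (dmin nums r) ((r : Int) - k)

-- A's cur_sum after processing r elements
def curSpec (nums : List Int) (k : Int) (r : Nat) : Int := (seg nums (lSpec nums k r).toNat r).sum

-- A's res after processing r elements
def resSpecF (nums : List Int) (k : Int) (res : Int) (e : Nat) : Int :=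
  if (e : Int) - lSpec nums k (e + 1) + 1 = k then max res (curSpec nums k (e + 1)) else res
def resSpec (nums : List Int) (k : Int) (r : Nat) : Int :=
  (List.range r).foldl (resSpecF nums k) 0

-- the dict A has built after processing r elements
def prevDict (nums : List Int) (r : Nat) : PySem.Dict Int Int :=
  (List.range r).foldl (fun d j => d.insert (nums.getD j 0) (j : Int)) PySem.Dict.empty

lemma lastLt_succ (nums : List Int) (r : Nat) (v : Int) :
    lastLt nums (r + 1) v = if nums.getD r 0 = v then (r : Int) else lastLt nums r v := by
  unfold lastLt
  rw [List.range_succ, List.foldl_append, List.foldl_cons, List.foldl_nil]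

lemma lastLt_lt (nums : List Int) (r : Nat) (v : Int) : lastLt nums r v < (r : Int) := by
  induction r with
  | zero => norm_num [lastLt]
  | succ r ih =>
    rw [lastLt_succ]
    split
    · push_cast; omega
    · push_cast; omega

lemma lastLt_lt_iff (nums : List Int) (r : Nat) (v : Int) (s : Nat) :
    lastLt nums r v < (s : Int) ↔ ∀ j : Nat, s ≤ j → j < r → nums.getD j 0 ≠ v := by
  induction r with
  | zero =>
    simp only [lastLt, List.range_zero, List.foldl_nil]
    constructor
    · intro _ j _ hj; omega
    · intro _; omega
  | succ r ih =>
    rw [lastLt_succ]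
    by_cases h : nums.getD r 0 = v
    · rw [if_pos h]
      constructor
      · intro hlt j h1 h2 _; omega
      · intro hall
        by_contra hge
        exact hall r (by omega) (by omega) h
    · rw [if_neg h, ih]
      constructor
      · intro hall j h1 h2
        rcases Nat.lt_succ_iff_lt_or_eq.1 h2 with h3 | rfl
        · exact hall j h1 h3
        · exact fun he => h he
      · intro hall j h1 h2
        exact hall j h1 (by omega)

lemma dmin_nonneg (nums : List Int) (r : Nat) : 0 ≤ dmin nums r := by
  induction r with
  | zero => simp [dmin]
  | succ r ih => simp only [dmin]; omega

lemma dmin_le (nums : List Int) (r : Nat) : dmin nums r ≤ (r : Int) := by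
  induction r with
  | zero => simp [dmin]
  | succ r ih =>
    have := lastLt_lt nums r (nums.getD r 0)
    simp only [dmin]
    push_cast
    omega

lemma seg_nil (nums : List Int) (s e : Nat) (h : e ≤ s) : seg nums s e = [] := by
  simp [seg, Nat.sub_eq_zero_of_le h]

lemma seg_succ (nums : List Int) (s e : Nat) (hse : s ≤ e) (he : e < nums.length) :
    seg nums s (e + 1) = seg nums s e ++ [nums.getD e 0] := by
  unfold seg
  have h1 : e + 1 - s = (e - s) + 1 := by omega
  rw [h1, List.take_add_one]
  congr 1
  rw [List.getElem?_drop]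
  have h2 : s + (e - s) = e := by omega
  rw [h2, List.getElem?_eq_getElem he]
  simp [List.getElem?_eq_getElem he]

lemma seg_cons (nums : List Int) (s e : Nat) (hse : s < e) (hs : s < nums.length) :
    seg nums s e = nums.getD s 0 :: seg nums (s + 1) e := by
  unfold seg
  rw [List.drop_eq_getElem_cons hs]
  have h1 : e - s = (e - (s + 1)) + 1 := by omega
  rw [h1, List.take_succ_cons, List.getD_eq_getElem nums 0 hs]

lemma mem_seg (nums : List Int) (s e : Nat) (v : Int) :
    v ∈ seg nums s e ↔ ∃ j : Nat, s ≤ j ∧ j < e ∧ j < nums.length ∧ nums.getD j 0 = v := by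
  unfold seg
  constructor
  · intro h
    obtain ⟨t, ht, hv⟩ := List.mem_iff_getElem.1 h
    have hlen : t < min (e - s) (nums.length - s) := by
      simpa [List.length_take, List.length_drop] using ht
    refine ⟨s + t, by omega, by omega, by omega, ?_⟩
    rw [List.getD_eq_getElem nums 0 (by omega)]
    rw [List.getElem_take, List.getElem_drop] at hv
    exact hv
  · rintro ⟨j, h1, h2, h3, hv⟩
    apply List.mem_iff_getElem.2
    have hlen : j - s < ((nums.drop s).take (e - s)).length := by
      simp only [List.length_take, List.length_drop]; omega
    refine ⟨j - s, hlen, ?_⟩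
    rw [List.getElem_take, List.getElem_drop]
    have h4 : s + (j - s) = j := by omega
    simp_rw [h4]
    rw [← List.getD_eq_getElem nums 0 h3]
    exact hv

lemma length_seg (nums : List Int) (s e : Nat) (he : e ≤ nums.length) (hse : s ≤ e) :
    (seg nums s e).length = e - s := by
  simp only [seg, List.length_take, List.length_drop]
  omega

-- dmin characterises window distinctness
lemma dmin_char (nums : List Int) : ∀ r : Nat, r ≤ nums.length → ∀ s : Nat, s ≤ r →
    (dmin nums r ≤ (s : Int) ↔ (seg nums s r).Nodup) := by
  intro r
  induction r with
  | zero =>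
    intro _ s _
    simp [dmin, seg]
  | succ r ih =>
    intro hr s hs
    by_cases hsr : s = r + 1
    · subst hsr
      rw [seg_nil nums (r + 1) (r + 1) le_rfl]
      have hd := dmin_le nums (r + 1)
      simp only [List.nodup_nil, iff_true]
      push_cast at hd ⊢
      omega
    · have hs' : s ≤ r := by omega
      rw [seg_succ nums s r hs' (by omega)]
      have hx := lastLt_lt_iff nums r (nums.getD r 0) s
      have ihr := ih (by omega) s hs'
      have hnotmem : (nums.getD r 0 ∉ seg nums s r) ↔
          ∀ j : Nat, s ≤ j → j < r → nums.getD j 0 ≠ nums.getD r 0 := by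
        rw [mem_seg]
        push Not
        constructor
        · intro h j h1 h2
          exact h j h1 h2 (by omega)
        · intro h j h1 h2 _
          exact h j h1 h2
      have key : (seg nums s r ++ [nums.getD r 0]).Nodup ↔
          (seg nums s r).Nodup ∧ nums.getD r 0 ∉ seg nums s r := by
        constructor
        · intro h
          exact ⟨h.sublist (List.sublist_append_left _ _),
            fun hm => (List.disjoint_of_nodup_append h) hm (List.mem_singleton_self _)⟩
        · rintro ⟨hn1, hn2⟩
          refine List.Nodup.append hn1 (List.nodup_singleton _) ?_
          intro a ha hb
          rw [List.mem_singleton] at hb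
          subst hb
          exact hn2 ha
      calc dmin nums (r + 1) ≤ (s : Int)
          ↔ dmin nums r ≤ (s : Int) ∧ lastLt nums r (nums.getD r 0) < (s : Int) := by
            simp only [dmin]; omega
        _ ↔ (seg nums s r).Nodup ∧ nums.getD r 0 ∉ seg nums s r :=
            and_congr ihr (hx.trans hnotmem.symm)
        _ ↔ (seg nums s r ++ [nums.getD r 0]).Nodup := key.symm

-- the while loop runs l from l0 up to max(l0, i+1, r+1-k), keeping cur = sum nums[l:r+1]
lemma whileA_run (nums : List Int) (k i : Int) (rn : Nat) (hr : rn < nums.length) (hk : 0 ≤ k)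
    (hi : i < (rn : Int)) :
    ∀ fuel : Nat, ∀ l0 : Nat, (l0 : Int) ≤ (rn : Int) + 1 → (rn : Int) + 1 - l0 + 1 ≤ (fuel : Int) →
    whileA nums k i (rn : Int) fuel ((l0 : Int), (seg nums l0 (rn + 1)).sum) =
      (max (l0 : Int) (max (i + 1) ((rn : Int) + 1 - k)),
       (seg nums (max (l0 : Int) (max (i + 1) ((rn : Int) + 1 - k))).toNat (rn + 1)).sum) := by
  intro fuel
  induction fuel with
  | zero =>
    intro l0 h1 h2
    exfalso
    push_cast at h2
    omega
  | succ fuel ih =>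
    intro l0 h1 h2
    show (if ((l0 : Int), (seg nums l0 (rn + 1)).sum).1 ≤ i ∨
            (rn : Int) - ((l0 : Int), (seg nums l0 (rn + 1)).sum).1 + 1 > k then _ else _) = _
    by_cases hcond : (l0 : Int) ≤ i ∨ (rn : Int) - (l0 : Int) + 1 > k
    · rw [if_pos hcond]
      have hl0 : l0 ≤ rn := by
        rcases hcond with h | h
        · omega
        · omega
      have hget : PySem.List.pyGetD nums (l0 : Int) 0 = nums.getD l0 0 := by
        simp [PySem.List.pyGetD_natCast]
      have hseg := seg_cons nums l0 (rn + 1) (by omega) (by omega)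
      have hsum : (seg nums l0 (rn + 1)).sum - nums.getD l0 0 = (seg nums (l0 + 1) (rn + 1)).sum := by
        rw [hseg, List.sum_cons]
        ring
      have hc1 : (l0 : Int) + 1 = ((l0 + 1 : Nat) : Int) := by push_cast; ring
      have hrec := ih (l0 + 1) (by push_cast; omega) (by push_cast; omega)
      simp only [hget]
      rw [hsum, hc1, hrec]
      have hmax : max ((l0 + 1 : Nat) : Int) (max (i + 1) ((rn : Int) + 1 - k)) =
          max (l0 : Int) (max (i + 1) ((rn : Int) + 1 - k)) := by
        push_cast
        omega
      rw [hmax]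
    · rw [if_neg hcond]
      push Not at hcond
      have hmax : max (l0 : Int) (max (i + 1) ((rn : Int) + 1 - k)) = (l0 : Int) := by
        obtain ⟨ha, hb⟩ := hcond
        omega
      rw [hmax, Int.toNat_natCast]

lemma prevDict_succ (nums : List Int) (r : Nat) :
    prevDict nums (r + 1) = (prevDict nums r).insert (nums.getD r 0) (r : Int) := by
  simp [prevDict, List.range_succ]

lemma prevDict_getD (nums : List Int) (r : Nat) (v : Int) :
    (prevDict nums r).getD v (-1) = lastLt nums r v := by
  induction r with
  | zero => simp [prevDict, lastLt]
  | succ r ih =>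
    rw [prevDict_succ, PySem.Dict.getD_insert, lastLt_succ]
    by_cases h : nums.getD r 0 = v
    · rw [if_pos h, if_pos h.symm]
    · rw [if_neg h, if_neg (fun hv => h hv.symm), ih]

lemma resSpec_succ (nums : List Int) (k : Int) (r : Nat) :
    resSpec nums k (r + 1) = resSpecF nums k (resSpec nums k r) r := by
  simp [resSpec, List.range_succ]

lemma lSpec_nonneg (nums : List Int) (k : Int) (r : Nat) : 0 ≤ lSpec nums k r := by
  have := dmin_nonneg nums r
  simp only [lSpec]
  omega

lemma lSpec_le (nums : List Int) (k : Int) (hk : 0 ≤ k) (r : Nat) : lSpec nums k r ≤ (r : Int) := by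
  have := dmin_le nums r
  simp only [lSpec]
  omega

-- main invariant for A's outer loop
lemma foldA_inv (nums : List Int) (k : Int) (hk : 0 ≤ k) :
    ∀ r : Nat, r ≤ nums.length →
    (List.range r).foldl (stepA nums k) (0, PySem.Dict.empty, 0, 0) =
      (resSpec nums k r, prevDict nums r, curSpec nums k r, lSpec nums k r) := by
  intro r
  induction r with
  | zero =>
    intro _
    have hl : lSpec nums k 0 = 0 := by
      simp only [lSpec, dmin, Nat.cast_zero, zero_sub]
      omega
    simp [resSpec, prevDict, curSpec, hl, seg]
  | succ r ih =>
    intro hr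
    rw [List.range_succ, List.foldl_append, List.foldl_cons, List.foldl_nil, ih (by omega)]
    -- abbreviations
    have hrn : r < nums.length := by omega
    have hl_nonneg := lSpec_nonneg nums k r
    have hl_le := lSpec_le nums k hk r
    have htn : ((lSpec nums k r).toNat : Int) = lSpec nums k r := Int.toNat_of_nonneg hl_nonneg
    -- the new cur after `cur_sum += nums[r]`
    have hcur : curSpec nums k r + nums.getD r 0 = (seg nums (lSpec nums k r).toNat (r + 1)).sum := by
      rw [curSpec, seg_succ nums _ r (by omega) hrn, List.sum_append, List.sum_cons, List.sum_nil]
      ring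
    have hlast := lastLt_lt nums r (nums.getD r 0)
    have hrun := whileA_run nums k (lastLt nums r (nums.getD r 0)) r hrn hk hlast
      (nums.length + 1) (lSpec nums k r).toNat (by omega) (by push_cast; omega)
    rw [htn] at hrun
    have hLeq : max (lSpec nums k r) (max (lastLt nums r (nums.getD r 0) + 1) ((r : Int) + 1 - k)) =
        lSpec nums k (r + 1) := by
      simp only [lSpec, dmin]
      push_cast
      omega
    rw [hLeq] at hrun
    simp only [stepA, PySem.List.pyGetD_natCast, prevDict_getD]
    rw [hcur, hrun]
    rw [resSpec_succ nums k r]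
    simp only [resSpecF]
    have hps := prevDict_succ nums r
    have hcs : curSpec nums k (r + 1) = (seg nums (lSpec nums k (r + 1)).toNat (r + 1)).sum := rfl
    rw [← hps, ← hcs]

-- distinctness via set size: len(set(w)) = len(w) iff w has no duplicates
lemma setLen_eq_iff (w : List Int) : (PySem.Set.ofList w).length = w.length ↔ w.Nodup := by
  have hfs : (PySem.Set.ofList w).toFinset = w.toFinset := by
    ext a
    simp [List.mem_toFinset, PySem.Set.mem_ofList]
  have h1 : (PySem.Set.ofList w).toFinset.card = (PySem.Set.ofList w).length :=
    List.toFinset_card_of_nodup (PySem.Set.nodup_ofList w)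
  have h2 : w.toFinset.card = w.length ↔ w.Nodup := by
    simpa using Multiset.toFinset_card_eq_card_iff_nodup (m := (w : Multiset Int))
  rw [← h1, hfs]
  exact h2

lemma foldl_max_zero (l : List Int) : l.foldl (fun (res : Int) (_ : Int) => max res 0) 0 = 0 := by
  induction l with
  | nil => rfl
  | cons x t ih => simpa using ih

lemma resSpec_zero_k0 (nums : List Int) : ∀ r : Nat, r ≤ nums.length → resSpec nums 0 r = 0 := by
  intro r
  induction r with
  | zero => intro _; rfl
  | succ r ih =>
    intro hr
    rw [resSpec_succ, resSpecF, ih (by omega)]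
    have hd1 := dmin_le nums (r + 1)
    have hd2 := dmin_nonneg nums (r + 1)
    have hl : lSpec nums 0 (r + 1) = (r : Int) + 1 := by
      simp only [lSpec]
      push_cast at hd1
      omega
    rw [if_pos (by rw [hl]; ring)]
    have : curSpec nums 0 (r + 1) = 0 := by
      rw [curSpec, hl]
      rw [seg_nil nums _ (r + 1) (by omega)]
      rfl
    rw [this]
    simp

lemma resSpec_zero_big (nums : List Int) (k : Int) (hbig : (nums.length : Int) < k) :
    ∀ r : Nat, r ≤ nums.length → resSpec nums k r = 0 := by
  intro r
  induction r with
  | zero => intro _; rfl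
  | succ r ih =>
    intro hr
    rw [resSpec_succ, resSpecF, ih (by omega)]
    have hl := lSpec_nonneg nums k (r + 1)
    rw [if_neg (by omega)]

lemma resSpec_eq_foldB (nums : List Int) (k : Int) (hk : 0 ≤ k) :
    resSpec nums k nums.length = maximumSubarraySum_alt_alt nums k := by
  unfold maximumSubarraySum_alt_alt
  by_cases hk0 : k = 0
  · subst hk0
    rw [resSpec_zero_k0 nums nums.length le_rfl]
    symm
    refine (PySem.List.foldl_congr_mem _ _ _ _ ?_).trans (foldl_max_zero _)
    intro acc i hi
    have h0i : 0 ≤ i := (PySem.List.mem_pyRange_one.1 hi).1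
    have hw : PySem.List.slice nums (some i) (some i) = [] := by
      rw [PySem.List.slice_toNat nums h0i h0i]
      simp
    simp [hw, PySem.Set.ofList]
  · by_cases hbig : (nums.length : Int) < k
    · rw [resSpec_zero_big nums k hbig nums.length le_rfl]
      rw [PySem.List.pyRange_one_eq_nil (by omega), List.foldl_nil]
    · -- main case: 1 ≤ k ≤ nums.length
      have hk1 : 1 ≤ k := by omega
      set n := nums.length with hn
      set kn := k.toNat with hkn
      have hknc : (kn : Int) = k := Int.toNat_of_nonneg hk
      have hkn1 : 1 ≤ kn := by omega
      have hknn : kn ≤ n := by omega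
      set m := n - kn + 1 with hm
      -- B side: turn the pyRange fold into a fold over List.range m
      rw [PySem.List.pyRange_one]
      have hmt : (((n : Int) - k + 1) - 0).toNat = m := by omega
      rw [hmt, List.foldl_map]
      -- A side: split range n at kn - 1
      have hsplit : n = (kn - 1) + m := by omega
      rw [resSpec, hsplit, List.range_add, List.foldl_append]
      have hzero : (List.range (kn - 1)).foldl (resSpecF nums k) 0 = 0 := by
        refine (PySem.List.foldl_congr_mem _ _ _ _ ?_).trans (PySem.List.foldl_ignore _ _)
        intro acc e he
        have he' : e < kn - 1 := List.mem_range.1 he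
        have hl := lSpec_nonneg nums k (e + 1)
        rw [resSpecF, if_neg (by omega)]
      rw [hzero, List.foldl_map]
      apply PySem.List.foldl_congr_mem _ _ _ _
      intro acc t ht
      have ht' : t < m := List.mem_range.1 ht
      -- both bodies at position t
      have he1 : (kn - 1) + t + 1 = kn + t := by omega
      have hwB : PySem.List.slice nums (some (0 + (t : Int))) (some (0 + (t : Int) + k)) =
          seg nums t (kn + t) := by
        rw [zero_add, PySem.List.slice_toNat nums (by omega) (by omega)]
        have h1 : ((t : Int)).toNat = t := by omega
        have h2 : ((t : Int) + k).toNat = t + kn := by omega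
        rw [h1, h2, seg]
        congr 1
        omega
      have hlen : (seg nums t (kn + t)).length = kn := by
        rw [length_seg nums t (kn + t) (by omega) (by omega)]
        omega
      have hcondA : ((((kn - 1) + t : Nat) : Int) - lSpec nums k ((kn - 1) + t + 1) + 1 = k) ↔
          dmin nums (kn + t) ≤ (t : Int) := by
        rw [he1]
        have hd := dmin_nonneg nums (kn + t)
        simp only [lSpec]
        push_cast
        omega
      have hcondB : (((PySem.Set.ofList (seg nums t (kn + t))).length : Int) = k) ↔
          (seg nums t (kn + t)).Nodup := by
        rw [← setLen_eq_iff, hlen]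
        omega
      have hchar := dmin_char nums (kn + t) (by omega) t (by omega)
      rw [resSpecF]
      simp only [hwB]
      by_cases hnd : (seg nums t (kn + t)).Nodup
      · rw [if_pos (hcondA.2 (hchar.2 hnd)), if_pos (hcondB.2 hnd)]
        have hls : lSpec nums k ((kn - 1) + t + 1) = (t : Int) := by
          rw [he1]
          have := hchar.2 hnd
          simp only [lSpec]
          omega
        rw [curSpec, hls]
        have : ((t : Int)).toNat = t := by omega
        rw [this, he1]
      · rw [if_neg (fun h => hnd (hchar.1 (hcondA.1 h))), if_neg (fun h => hnd (hcondB.1 h))]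

lemma alt_alt_nil (k : Int) : maximumSubarraySum_alt_alt [] k = 0 := by
  unfold maximumSubarraySum_alt_alt
  refine (PySem.List.foldl_congr_mem _ _
    (fun res (_ : Int) => if ((0 : Nat) : Int) = k then max res 0 else res) _ ?_).trans ?_
  · intro acc i _
    have hw : PySem.List.slice ([] : List Int) (some i) (some (i + k)) = [] := by
      simp [PySem.List.slice]
    simp [hw, PySem.Set.ofList]
  · by_cases hk0 : ((0 : Nat) : Int) = k
    · simp only [if_pos hk0]
      exact foldl_max_zero _
    · simp only [if_neg hk0]
      exact PySem.List.foldl_ignore _ _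

-- ===== VERDICT (by name: the statement is the Claim_ definition above) =====
theorem maximumSubarraySum_alt_spec : Claim_equal_maximumSubarraySum_alt := by
  intro nums k _ hpre
  unfold Spec_maximumSubarraySum_alt
  rcases hpre with hk | hnil
  · unfold maximumSubarraySum_alt
    rw [foldA_inv nums k hk nums.length le_rfl]
    exact resSpec_eq_foldB nums k hk
  · subst hnil
    rw [alt_alt_nil]
    rfl
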